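-- pv_equiv track=rewrite | github.com/csutils/csmock | py/common/util.py | strlist_to_shell_cmd
-- ===== SOURCE A (Python) =====
-- def shell_quote(str_in):
--     str_out = ""
--     for i in range(0, len(str_in)):
--         c = str_in[i]
--         if c == "\\":
--             str_out += "\\\\"
--         elif c == "\"":
--             str_out += "\\\""
--         elif c == "$":
--             str_out += "\\$"
--         else:
--             str_out += c
--     return "\"" + str_out + "\""
--
-- def strlist_to_shell_cmd(cmd_in, escape_special=False):
--     def translate_one(i):
--         if escape_special:
--             return shell_quote(i)
--         return "'%s'" % i
--
--     if type(cmd_in) is str: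
--         return "sh -c %s" % translate_one(cmd_in)
--     cmd_out = ""
--     for i in cmd_in:
--         cmd_out += " " + translate_one(i)
--     return cmd_out.lstrip()
-- ===== SOURCE B (Python) =====
-- def shell_quote(str_in):
--     # escape backslash first, then double-quote, then dollar
--     return '"' + str_in.replace("\\", "\\\\").replace('"', '\\"').replace("$", "\\$") + '"'
--
-- def strlist_to_shell_cmd(cmd_in, escape_special=False):
--     def translate_one(i):
--         if escape_special:
--             return shell_quote(i)
--         return "'%s'" % i
--
--     if type(cmd_in) is str:
--         return "sh -c %s" % translate_one(cmd_in)
--     return " ".join(translate_one(i) for i in cmd_in)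
-- ===== Notes on version B (the rewrite author's own statement) =====
-- stated objective: idiomatic
-- what changed: shell_quote's per-character if/elif accumulation loop is replaced by three sequential str.replace passes (backslash first, then double-quote, then dollar) wrapped in quotes, and the outer ' '+token accumulating loop followed by lstrip is replaced by ' '.join over a generator.
import Mathlib
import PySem

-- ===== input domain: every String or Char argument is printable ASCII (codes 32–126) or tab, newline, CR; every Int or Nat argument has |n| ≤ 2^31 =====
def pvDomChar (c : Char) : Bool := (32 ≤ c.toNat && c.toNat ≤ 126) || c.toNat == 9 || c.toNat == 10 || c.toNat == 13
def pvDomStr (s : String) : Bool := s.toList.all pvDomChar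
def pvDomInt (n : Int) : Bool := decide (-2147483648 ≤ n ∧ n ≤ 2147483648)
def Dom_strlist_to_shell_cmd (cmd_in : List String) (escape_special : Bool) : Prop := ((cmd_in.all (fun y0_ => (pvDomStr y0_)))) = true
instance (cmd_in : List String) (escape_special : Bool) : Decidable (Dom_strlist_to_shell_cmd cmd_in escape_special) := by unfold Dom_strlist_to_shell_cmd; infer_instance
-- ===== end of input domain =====

-- B escapes via three sequential str.replace passes (backslash first) and joins tokens with
-- ' '.join, replacing A's per-character if/elif loop and ' '+token/lstrip accumulation.

-- ===== PORT A =====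
-- A iterates 'for i in range(len(str_in)): c = str_in[i]'; every index is in range, so
-- this is ported as the fold over the string's characters in the same order.
def pvShellQuote (str_in : String) : String :=
  let str_out := str_in.toList.foldl (fun str_out c =>
    if c = '\\' then str_out ++ "\\\\"
    else if c = '"' then str_out ++ "\\\""
    else if c = '$' then str_out ++ "\\$"
    else str_out ++ String.ofList [c]) ""
  "\"" ++ str_out ++ "\""

def pvTranslateOne (escape_special : Bool) (i : String) : String :=
  if escape_special then pvShellQuote i else "'" ++ i ++ "'"

-- cmd_in : List String, so Python's 'type(cmd_in) is str' branch is never taken.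
def strlist_to_shell_cmd (cmd_in : List String) (escape_special : Bool) : String :=
  let cmd_out := cmd_in.foldl (fun cmd_out i => cmd_out ++ " " ++ pvTranslateOne escape_special i) ""
  PySem.Str.lstrip cmd_out

-- ===== PORT B =====
def pvShellQuoteAlt (str_in : String) : String :=
  "\"" ++ PySem.Str.replace (PySem.Str.replace (PySem.Str.replace str_in "\\" "\\\\") "\"" "\\\"") "$" "\\$" ++ "\""

def pvTranslateOneAlt (escape_special : Bool) (i : String) : String :=
  if escape_special then pvShellQuoteAlt i else "'" ++ i ++ "'"

def strlist_to_shell_cmd_alt (cmd_in : List String) (escape_special : Bool) : String :=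
  PySem.Str.join " " (cmd_in.map (pvTranslateOneAlt escape_special))

-- ===== PRECONDITION & SPEC =====
def Spec_strlist_to_shell_cmd (cmd_in : List String) (escape_special : Bool) (out : String) : Prop := out = strlist_to_shell_cmd_alt cmd_in escape_special
instance (cmd_in : List String) (escape_special : Bool) (out : String) : Decidable (Spec_strlist_to_shell_cmd cmd_in escape_special out) := by unfold Spec_strlist_to_shell_cmd; infer_instance

-- ===== CLAIM (what is proved, stated in full; the proofs are below) =====
def Claim_equal_strlist_to_shell_cmd : Prop := ∀ (cmd_in : List String) (escape_special : Bool), Dom_strlist_to_shell_cmd cmd_in escape_special → Spec_strlist_to_shell_cmd cmd_in escape_special (strlist_to_shell_cmd cmd_in escape_special)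

-- ===== LEMMAS AND PROOFS =====

-- single-character replace is a flatMap
theorem prefOne (a c : Char) (t : List Char) : [a].isPrefixOf (c :: t) = (a == c) := by
  cases h : a == c
  · simp only [Bool.eq_false_iff, ne_eq, List.isPrefixOf_iff_prefix, List.cons_prefix_cons]
    simp_all
  · simp only [List.isPrefixOf_iff_prefix, List.cons_prefix_cons]
    simp_all

theorem replace_go_step_hit (a : Char) (n : List Char) (f : Nat) (t acc : List Char) :
    PySem.Chars.replace.go [a] n (f + 1) (a :: t) acc
      = PySem.Chars.replace.go [a] n f t (n.reverse ++ acc) := by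
  rw [PySem.Chars.replace.go]
  simp [List.isPrefixOf]

theorem replace_go_step_miss (a c : Char) (h : c ≠ a) (n : List Char) (f : Nat) (t acc : List Char) :
    PySem.Chars.replace.go [a] n (f + 1) (c :: t) acc
      = PySem.Chars.replace.go [a] n f t (c :: acc) := by
  rw [PySem.Chars.replace.go, prefOne]
  have hb : (a == c) = false := beq_eq_false_iff_ne.mpr (Ne.symm h)
  rw [hb]
  simp

theorem replace_go_single (a : Char) (n : List Char) (l : List Char) :
    ∀ (fuel : Nat) (acc : List Char), l.length ≤ fuel →
      PySem.Chars.replace.go [a] n fuel l acc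
        = acc.reverse ++ l.flatMap (fun c => if c = a then n else [c]) := by
  induction l with
  | nil =>
    intro fuel acc _
    cases fuel <;> simp [PySem.Chars.replace.go]
  | cons c t ih =>
    intro fuel acc hlen
    cases fuel with
    | zero => simp at hlen
    | succ f =>
      have ht : t.length ≤ f := by simpa using hlen
      by_cases hca : c = a
      · subst hca
        rw [replace_go_step_hit, ih f _ ht]
        simp
      · rw [replace_go_step_miss a c hca, ih f _ ht]
        simp [hca]

theorem replace_single (a : Char) (n s : List Char) :
    PySem.Chars.replace s [a] n = s.flatMap (fun c => if c = a then n else [c]) := by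
  simp [PySem.Chars.replace, replace_go_single a n s s.length [] le_rfl]

def pvEsc (c : Char) : List Char :=
  if c = '\\' then ['\\', '\\']
  else if c = '"' then ['\\', '"']
  else if c = '$' then ['\\', '$']
  else [c]

theorem quote_fold_toList (l : List Char) (acc : String) :
    (l.foldl (fun str_out c =>
      if c = '\\' then str_out ++ "\\\\"
      else if c = '"' then str_out ++ "\\\""
      else if c = '$' then str_out ++ "\\$"
      else str_out ++ String.ofList [c]) acc).toList = acc.toList ++ l.flatMap pvEsc := by
  induction l generalizing acc with
  | nil => simp
  | cons c t ih =>
    have e1 : ("\\\\" : String).toList = ['\\', '\\'] := by decide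
    have e2 : ("\\\"" : String).toList = ['\\', '"'] := by decide
    have e3 : ("\\$" : String).toList = ['\\', '$'] := by decide
    simp only [List.foldl_cons, List.flatMap_cons]
    split_ifs with h1 h2 h3
    · simp [ih, String.toList_append, e1, pvEsc, h1]
    · simp [ih, String.toList_append, e2, pvEsc, h2]
    · simp [ih, String.toList_append, e3, pvEsc, h3]
    · simp [ih, String.toList_append, pvEsc, h1, h2, h3]

-- chaining the three single-character replacements character-wise gives pvEsc
theorem esc_chain (c : Char) :
    ((if c = '\\' then ['\\', '\\'] else [c]).flatMap
        (fun d => if d = '"' then ['\\', '"'] else [d])).flatMap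
      (fun d => if d = '$' then ['\\', '$'] else [d]) = pvEsc c := by
  by_cases h1 : c = '\\'
  · subst h1; decide
  · by_cases h2 : c = '"'
    · subst h2; decide
    · by_cases h3 : c = '$'
      · subst h3; decide
      · simp [pvEsc, h1, h2, h3]

theorem chain_eq (s : List Char) :
    ((s.flatMap (fun c => if c = '\\' then ['\\', '\\'] else [c])).flatMap
        (fun d => if d = '"' then ['\\', '"'] else [d])).flatMap
      (fun d => if d = '$' then ['\\', '$'] else [d]) = s.flatMap pvEsc := by
  induction s with
  | nil => simp
  | cons c t ih =>
    simp only [List.flatMap_cons, List.flatMap_append]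
    rw [esc_chain c, ih]

theorem shellQuote_eq (s : String) : pvShellQuote s = pvShellQuoteAlt s := by
  apply String.toList_inj.mp
  simp only [pvShellQuote, pvShellQuoteAlt, String.toList_append,
    PySem.Str.toList_replace, quote_fold_toList]
  have h1 : ("\\" : String).toList = ['\\'] := by decide
  have h2 : ("\\\\" : String).toList = ['\\', '\\'] := by decide
  have h3 : ("\"" : String).toList = ['"'] := by decide
  have h4 : ("\\\"" : String).toList = ['\\', '"'] := by decide
  have h5 : ("$" : String).toList = ['$'] := by decide
  have h6 : ("\\$" : String).toList = ['\\', '$'] := by decide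
  rw [h1, h2, h3, h4, h5, h6, replace_single, replace_single, replace_single, chain_eq]
  simp

theorem translate_eq (e : Bool) (i : String) :
    pvTranslateOneAlt e i = pvTranslateOne e i := by
  cases e <;> simp [pvTranslateOne, pvTranslateOneAlt, shellQuote_eq]

theorem translate_head (e : Bool) (i : String) :
    ∃ c rest, (pvTranslateOne e i).toList = c :: rest ∧ PySem.Chars.isspace c = false := by
  cases e with
  | false =>
    have h : ("'" : String).toList = ['\''] := by decide
    exact ⟨'\'', i.toList ++ ['\''], by simp [pvTranslateOne, String.toList_append, h], by decide⟩
  | true =>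
    have h : ("\"" : String).toList = ['"'] := by decide
    exact ⟨'"', i.toList.flatMap pvEsc ++ ['"'],
      by simp [pvTranslateOne, pvShellQuote, String.toList_append, h, quote_fold_toList], by decide⟩

theorem fold_join_toList (t : String → String) (l : List String) (acc : String) :
    (l.foldl (fun acc i => acc ++ " " ++ t i) acc).toList
      = acc.toList ++ l.flatMap (fun i => ' ' :: (t i).toList) := by
  induction l generalizing acc with
  | nil => simp
  | cons x xs ih =>
    simp [ih, String.toList_append]

theorem join_flatMap (t : String → String) (x : String) (xs : List String) :
    PySem.Chars.join [' '] (((x :: xs).map t).map String.toList)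
      = (t x).toList ++ xs.flatMap (fun i => ' ' :: (t i).toList) := by
  induction xs generalizing x with
  | nil => simp [PySem.Chars.join_singleton]
  | cons y ys ih =>
    simp only [List.map_cons] at ih ⊢
    rw [PySem.Chars.join_cons_cons, ih y]
    simp

-- ===== VERDICT (by name: the statement is the Claim_ definition above) =====
theorem strlist_to_shell_cmd_spec : Claim_equal_strlist_to_shell_cmd := by
  intro cmd_in escape_special _
  unfold Spec_strlist_to_shell_cmd
  apply String.toList_inj.mp
  simp only [strlist_to_shell_cmd, strlist_to_shell_cmd_alt, PySem.Str.toList_lstrip,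
    PySem.Str.toList_join, fold_join_toList]
  have hsep : (" " : String).toList = [' '] := by decide
  rw [hsep]
  have hte : pvTranslateOneAlt escape_special = pvTranslateOne escape_special :=
    funext (translate_eq escape_special)
  rw [hte]
  cases cmd_in with
  | nil => simp [PySem.Chars.join_nil, PySem.Chars.lstrip]
  | cons x xs =>
    rw [join_flatMap]
    obtain ⟨c, rest, hx, hc⟩ := translate_head escape_special x
    have hsp : PySem.Chars.isspace ' ' = true := by decide
    simp [PySem.Chars.lstrip, hx, hsp, hc]
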